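-- pv_equiv track=rewrite | github.com/nathaliaceretta/Algorithms | pistoleiros/queens/queens.py | addQueen
-- ===== SOURCE A (Python) =====
-- def addQueen(queensLeft,colOcuppied):
--     sum = 0
--
--     if(queensLeft == 0):
--         return 1
--     for i in range(3):
--         if(i not in colOcuppied):
--             queensLeft -=1
--             colOcuppied.add(i)
--             sum += addQueen(queensLeft,colOcuppied)
--             queensLeft +=1
--             colOcuppied.remove(i)
--
--
--     return sum
-- ===== SOURCE B (Python) =====
-- def addQueen(queensLeft, colOcuppied):
--     # Ordered placements of queensLeft queens into the free
--     # columns among {0,1,2} = falling factorial free*(free-1)*...*(free-q+1).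
--     if queensLeft == 0:
--         return 1
--     free = sum(1 for i in range(3) if i not in colOcuppied)
--     if queensLeft < 0 or queensLeft > free:
--         return 0
--     result = 1
--     for k in range(queensLeft):
--         result *= free - k
--     return result
-- ===== Notes on version B (the rewrite author's own statement) =====
-- stated objective: alternative
-- what changed: Replaces the backtracking recursion over free columns with the falling-factorial closed form: count the free columns among {0,1,2} and return free*(free-1)*...*(free-queensLeft+1), with 1 when queensLeft==0 and 0 when queensLeft<0 or queensLeft>free.
import Mathlib
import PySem

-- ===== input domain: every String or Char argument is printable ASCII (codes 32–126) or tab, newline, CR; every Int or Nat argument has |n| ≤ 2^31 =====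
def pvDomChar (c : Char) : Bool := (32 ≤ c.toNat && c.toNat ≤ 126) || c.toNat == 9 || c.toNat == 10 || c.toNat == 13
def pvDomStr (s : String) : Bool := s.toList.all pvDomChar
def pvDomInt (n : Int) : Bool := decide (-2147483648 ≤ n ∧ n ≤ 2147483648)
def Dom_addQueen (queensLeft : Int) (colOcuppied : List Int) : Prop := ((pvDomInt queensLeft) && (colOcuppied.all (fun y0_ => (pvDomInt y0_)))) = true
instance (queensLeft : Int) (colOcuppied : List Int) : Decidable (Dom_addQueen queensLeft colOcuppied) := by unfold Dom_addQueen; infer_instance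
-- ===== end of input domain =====

-- B replaces A's backtracking recursion by the falling-factorial closed form over the number of
-- free columns among {0,1,2}.  Python A mutates the set colOcuppied in place during the recursion
-- (add/remove, restored on exit); the equivalence proved here is about the RETURN value only.

-- ===== PORT A =====
-- Fuel only makes the recursion total: the recursion depth is bounded by the number of free
-- columns among {0,1,2} (< 4), so fuel 4 is never exhausted (proved in addQueenF_eq below).
def addQueenF : Nat → Int → List Int → Int
  | 0, _, _ => 0
  | fuel+1, queensLeft, colOcuppied =>
    if queensLeft = 0 then 1
    else
      (List.range 3).foldl
        (fun sum i =>
          if ¬ PySem.Set.contains colOcuppied (Int.ofNat i) then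
            sum + addQueenF fuel (queensLeft - 1) (PySem.Set.add colOcuppied (Int.ofNat i))
          else sum) 0

def addQueen (queensLeft : Int) (colOcuppied : List Int) : Int :=
  addQueenF 4 queensLeft colOcuppied

-- ===== PORT B =====
def addQueen_alt (queensLeft : Int) (colOcuppied : List Int) : Int :=
  if queensLeft = 0 then 1
  else
    let free : Nat := ((List.range 3).filter
      (fun i => ¬ PySem.Set.contains colOcuppied (Int.ofNat i))).length
    if queensLeft < 0 ∨ queensLeft > (free : Int) then 0
    else (List.range queensLeft.toNat).foldl (fun (r : Int) (k : Nat) => r * ((free : Int) - (k : Int))) 1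

-- ===== PRECONDITION & SPEC =====
def Spec_addQueen (queensLeft : Int) (colOcuppied : List Int) (out : Int) : Prop := out = addQueen_alt queensLeft colOcuppied
instance (queensLeft : Int) (colOcuppied : List Int) (out : Int) : Decidable (Spec_addQueen queensLeft colOcuppied out) := by unfold Spec_addQueen; infer_instance

-- ===== CLAIM (what is proved, stated in full; the proofs are below) =====
def Claim_equal_addQueen : Prop := ∀ (queensLeft : Int) (colOcuppied : List Int), Dom_addQueen queensLeft colOcuppied → Spec_addQueen queensLeft colOcuppied (addQueen queensLeft colOcuppied)

-- ===== LEMMAS AND PROOFS =====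

-- B's value as a function of queensLeft and the free-column count.
def altF (q : Int) (f : Nat) : Int :=
  if q = 0 then 1
  else if q < 0 ∨ q > (f : Int) then 0
  else (List.range q.toNat).foldl (fun (r : Int) (k : Nat) => r * ((f : Int) - (k : Int))) 1

-- the number of free columns among {0,1,2}
def freeLen (occ : List Int) : Nat :=
  ((List.range 3).filter (fun i => ¬ PySem.Set.contains occ (Int.ofNat i))).length

theorem addQueen_alt_eq_altF (q : Int) (occ : List Int) :
    addQueen_alt q occ = altF q (freeLen occ) := rfl

theorem not_contains_iff (occ : List Int) (x : Int) :
    (¬ PySem.Set.contains occ x = true) ↔ x ∉ occ := by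
  simp

theorem freeLen_eq (occ : List Int) :
    freeLen occ = (if (0:Int) ∈ occ then 0 else 1) + (if (1:Int) ∈ occ then 0 else 1)
      + (if (2:Int) ∈ occ then 0 else 1) := by
  have e3 : List.range 3 = [0, 1, 2] := rfl
  simp only [freeLen, e3, List.filter, decide_not,
    show Int.ofNat 0 = (0:Int) from rfl, show Int.ofNat 1 = (1:Int) from rfl,
    show Int.ofNat 2 = (2:Int) from rfl]
  by_cases h0 : (0:Int) ∈ occ <;> by_cases h1 : (1:Int) ∈ occ <;> by_cases h2 : (2:Int) ∈ occ <;>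
    simp [h0, h1, h2]

theorem foldl_mul_init (g : Nat → Int) (l : List Nat) (c a : Int) :
    l.foldl (fun (r : Int) (k : Nat) => r * g k) (c * a) = c * l.foldl (fun (r : Int) (k : Nat) => r * g k) a := by
  induction l generalizing a with
  | nil => rfl
  | cons x t ih => simp only [List.foldl_cons]; rw [mul_assoc, ih]

theorem foldl_range_prod_succ (n : Nat) (f : Nat) :
    (List.range (n+1)).foldl (fun (r : Int) (k : Nat) => r * ((f : Int) - (k : Int))) 1
      = (f : Int) * (List.range n).foldl (fun (r : Int) (k : Nat) => r * (((f : Int) - 1) - (k : Int))) 1 := by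
  rw [List.range_succ_eq_map, List.foldl_cons, List.foldl_map]
  have hbody : (fun (x : Int) (y : Nat) => x * ((f : Int) - ((y + 1 : Nat) : Int)))
      = (fun (r : Int) (k : Nat) => r * (((f : Int) - 1) - (k : Int))) := by
    funext x y; push_cast; ring
  rw [hbody, show (1 : Int) * ((f : Int) - ((0 : Nat) : Int)) = (f : Int) * 1 by push_cast; ring,
    foldl_mul_init (fun k => ((f : Int) - 1) - (k : Int))]

theorem altF_step (q : Int) (hq : q ≠ 0) (f : Nat) :
    (f : Int) * altF (q - 1) (f - 1) = altF q f := by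
  unfold altF
  rw [if_neg hq]
  by_cases hq1 : q - 1 = 0
  · rw [if_pos hq1]
    have hq' : q = 1 := by omega
    subst hq'
    cases f with
    | zero => simp
    | succ n =>
      rw [if_neg (by omega)]
      show ((n+1 : Nat) : Int) * 1 = (List.range (1:Int).toNat).foldl
        (fun (r : Int) (k : Nat) => r * (((n+1 : Nat) : Int) - (k : Int))) 1
      simp
  · rw [if_neg hq1]
    by_cases hqneg : q < 0
    · rw [if_pos (Or.inl hqneg), if_pos (Or.inl (by omega)), mul_zero]
    · by_cases hbig : q > (f : Int)
      · rw [if_pos (Or.inr hbig), if_pos (Or.inr (by omega)), mul_zero]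
      · rw [if_neg (by omega), if_neg (by omega)]
        have hqt : q.toNat = (q - 1).toNat + 1 := by omega
        rw [hqt, foldl_range_prod_succ]
        have hf : ((f - 1 : Nat) : Int) = (f : Int) - 1 := by omega
        rw [hf]

theorem addQueenF_eq (fuel : Nat) (q : Int) (occ : List Int)
    (h : freeLen occ < fuel) :
    addQueenF fuel q occ = altF q (freeLen occ) := by
  induction fuel generalizing q occ with
  | zero => omega
  | succ fuel ih =>
    simp only [addQueenF]
    by_cases hq : q = 0
    · subst hq; simp [altF]
    · rw [if_neg hq]
      have e3 : List.range 3 = [0, 1, 2] := rfl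
      rw [e3]
      simp only [List.foldl_cons, List.foldl_nil,
        show Int.ofNat 0 = (0:Int) from rfl, show Int.ofNat 1 = (1:Int) from rfl,
        show Int.ofNat 2 = (2:Int) from rfl, not_contains_iff]
      by_cases h0 : (0:Int) ∈ occ <;> by_cases h1 : (1:Int) ∈ occ <;> by_cases h2 : (2:Int) ∈ occ
      · have hf : freeLen occ = 0 := by rw [freeLen_eq]; simp [h0, h1, h2]
        rw [if_neg (not_not_intro h0)]
        rw [if_neg (not_not_intro h1)]
        rw [if_neg (not_not_intro h2)]
        have step := altF_step q hq 0
        norm_num at step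
        rw [hf]
        rw [← step]
      · have hf : freeLen occ = 1 := by rw [freeLen_eq]; simp [h0, h1, h2]
        rw [if_neg (not_not_intro h0)]
        rw [if_neg (not_not_intro h1)]
        rw [if_pos h2, PySem.Set.add_of_not_mem h2]
        have l2 : freeLen (occ ++ [(2:Int)]) = 0 := by
          rw [freeLen_eq]; simp [h0, h1, h2]
        rw [ih (q - 1) (occ ++ [(2:Int)]) (by rw [l2]; omega), l2]
        have step := altF_step q hq 1
        norm_num at step
        rw [hf]
        rw [← step]; ring
      · have hf : freeLen occ = 1 := by rw [freeLen_eq]; simp [h0, h1, h2]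
        rw [if_neg (not_not_intro h0)]
        rw [if_pos h1, PySem.Set.add_of_not_mem h1]
        rw [if_neg (not_not_intro h2)]
        have l1 : freeLen (occ ++ [(1:Int)]) = 0 := by
          rw [freeLen_eq]; simp [h0, h1, h2]
        rw [ih (q - 1) (occ ++ [(1:Int)]) (by rw [l1]; omega), l1]
        have step := altF_step q hq 1
        norm_num at step
        rw [hf]
        rw [← step]; ring
      · have hf : freeLen occ = 2 := by rw [freeLen_eq]; simp [h0, h1, h2]
        rw [if_neg (not_not_intro h0)]
        rw [if_pos h1, PySem.Set.add_of_not_mem h1]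
        rw [if_pos h2, PySem.Set.add_of_not_mem h2]
        have l1 : freeLen (occ ++ [(1:Int)]) = 1 := by
          rw [freeLen_eq]; simp [h0, h1, h2]
        rw [ih (q - 1) (occ ++ [(1:Int)]) (by rw [l1]; omega), l1]
        have l2 : freeLen (occ ++ [(2:Int)]) = 1 := by
          rw [freeLen_eq]; simp [h0, h1, h2]
        rw [ih (q - 1) (occ ++ [(2:Int)]) (by rw [l2]; omega), l2]
        have step := altF_step q hq 2
        norm_num at step
        rw [hf]
        rw [← step]; ring
      · have hf : freeLen occ = 1 := by rw [freeLen_eq]; simp [h0, h1, h2]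
        rw [if_pos h0, PySem.Set.add_of_not_mem h0]
        rw [if_neg (not_not_intro h1)]
        rw [if_neg (not_not_intro h2)]
        have l0 : freeLen (occ ++ [(0:Int)]) = 0 := by
          rw [freeLen_eq]; simp [h0, h1, h2]
        rw [ih (q - 1) (occ ++ [(0:Int)]) (by rw [l0]; omega), l0]
        have step := altF_step q hq 1
        norm_num at step
        rw [hf]
        rw [← step]; ring
      · have hf : freeLen occ = 2 := by rw [freeLen_eq]; simp [h0, h1, h2]
        rw [if_pos h0, PySem.Set.add_of_not_mem h0]
        rw [if_neg (not_not_intro h1)]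
        rw [if_pos h2, PySem.Set.add_of_not_mem h2]
        have l0 : freeLen (occ ++ [(0:Int)]) = 1 := by
          rw [freeLen_eq]; simp [h0, h1, h2]
        rw [ih (q - 1) (occ ++ [(0:Int)]) (by rw [l0]; omega), l0]
        have l2 : freeLen (occ ++ [(2:Int)]) = 1 := by
          rw [freeLen_eq]; simp [h0, h1, h2]
        rw [ih (q - 1) (occ ++ [(2:Int)]) (by rw [l2]; omega), l2]
        have step := altF_step q hq 2
        norm_num at step
        rw [hf]
        rw [← step]; ring
      · have hf : freeLen occ = 2 := by rw [freeLen_eq]; simp [h0, h1, h2]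
        rw [if_pos h0, PySem.Set.add_of_not_mem h0]
        rw [if_pos h1, PySem.Set.add_of_not_mem h1]
        rw [if_neg (not_not_intro h2)]
        have l0 : freeLen (occ ++ [(0:Int)]) = 1 := by
          rw [freeLen_eq]; simp [h0, h1, h2]
        rw [ih (q - 1) (occ ++ [(0:Int)]) (by rw [l0]; omega), l0]
        have l1 : freeLen (occ ++ [(1:Int)]) = 1 := by
          rw [freeLen_eq]; simp [h0, h1, h2]
        rw [ih (q - 1) (occ ++ [(1:Int)]) (by rw [l1]; omega), l1]
        have step := altF_step q hq 2
        norm_num at step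
        rw [hf]
        rw [← step]; ring
      · have hf : freeLen occ = 3 := by rw [freeLen_eq]; simp [h0, h1, h2]
        rw [if_pos h0, PySem.Set.add_of_not_mem h0]
        rw [if_pos h1, PySem.Set.add_of_not_mem h1]
        rw [if_pos h2, PySem.Set.add_of_not_mem h2]
        have l0 : freeLen (occ ++ [(0:Int)]) = 2 := by
          rw [freeLen_eq]; simp [h0, h1, h2]
        rw [ih (q - 1) (occ ++ [(0:Int)]) (by rw [l0]; omega), l0]
        have l1 : freeLen (occ ++ [(1:Int)]) = 2 := by
          rw [freeLen_eq]; simp [h0, h1, h2]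
        rw [ih (q - 1) (occ ++ [(1:Int)]) (by rw [l1]; omega), l1]
        have l2 : freeLen (occ ++ [(2:Int)]) = 2 := by
          rw [freeLen_eq]; simp [h0, h1, h2]
        rw [ih (q - 1) (occ ++ [(2:Int)]) (by rw [l2]; omega), l2]
        have step := altF_step q hq 3
        norm_num at step
        rw [hf]
        rw [← step]; ring

-- ===== VERDICT (by name: the statement is the Claim_ definition above) =====
theorem addQueen_spec : Claim_equal_addQueen := by
  intro q occ _
  show addQueen q occ = addQueen_alt q occ
  rw [addQueen, addQueen_alt_eq_altF]
  apply addQueenF_eq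
  have hle : freeLen occ ≤ 3 := by rw [freeLen_eq]; split_ifs <;> omega
  omega
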